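-- pv_equiv track=rewrite | github.com/postalservice14/YNAmazon | src/ynamazon/ynab_memo.py | _truncate_item_lines
-- ===== SOURCE A (Python) =====
-- def _truncate_item_lines(item_lines: list[str], available_space: int) -> list[str]:
--     """Truncate item lines to fit within available space."""
--     truncated_items = []
--     current_length = 0
--
--     for item in item_lines:
--         item_length = len(item) + 1  # +1 for newline
--         if current_length + item_length <= available_space:
--             truncated_items.append(item)
--             current_length += item_length
--         else:
--             remaining_space = available_space - current_length
--             if remaining_space >= 4:  # Enough space for "..."
--                 truncated_items.append("...")
--             break
--
--     return truncated_items
-- ===== SOURCE B (Python) =====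
-- import bisect
-- import itertools
--
--
-- def _truncate_item_lines(item_lines: list[str], available_space: int) -> list[str]:
--     """Truncate item lines to fit within available space (prefix sums + bisect)."""
--     sums = list(itertools.accumulate(len(s) + 1 for s in item_lines))
--     cutoff = bisect.bisect_right(sums, available_space)
--     if cutoff == len(item_lines):
--         return list(item_lines)
--     total = sums[cutoff - 1] if cutoff else 0
--     if available_space - total >= 4:
--         return item_lines[:cutoff] + ["..."]
--     return item_lines[:cutoff]
-- ===== Notes on version B (the rewrite author's own statement) =====
-- stated objective: alternative
-- what changed: Replaces the accumulating linear scan with early break by a prefix-sum table of per-line costs built with itertools.accumulate, a bisect_right binary search on it to find how many lines fit, and a single slice (plus '...' decided from the table).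
import Mathlib
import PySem

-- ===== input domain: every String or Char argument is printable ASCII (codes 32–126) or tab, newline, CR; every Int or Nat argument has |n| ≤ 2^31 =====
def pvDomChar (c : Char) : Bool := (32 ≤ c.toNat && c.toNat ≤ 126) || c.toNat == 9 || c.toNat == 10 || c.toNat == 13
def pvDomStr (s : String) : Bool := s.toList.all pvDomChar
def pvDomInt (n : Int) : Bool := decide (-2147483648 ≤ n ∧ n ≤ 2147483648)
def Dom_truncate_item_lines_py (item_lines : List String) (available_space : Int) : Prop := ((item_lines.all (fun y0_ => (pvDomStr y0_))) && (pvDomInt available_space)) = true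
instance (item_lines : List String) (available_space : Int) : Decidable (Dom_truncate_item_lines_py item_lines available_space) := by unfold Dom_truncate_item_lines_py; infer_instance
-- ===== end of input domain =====

-- B replaces A's accumulating scan-with-early-break by a prefix-sum table plus a
-- bisect_right binary search and a single slice (objective: alternative algorithm).


-- ===== PORT A =====
-- the for-loop: state = (accumulated output is the cons prefix, current_length = cur); break ends the recursion
def pvGoA : List String → Int → Int → List String
  | [], _, _ => []
  | item :: rest, cur, avail =>
    let item_length := PySem.Str.len item + 1
    if cur + item_length ≤ avail then
      item :: pvGoA rest (cur + item_length) avail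
    else
      if avail - cur ≥ 4 then ["..."] else []

def truncate_item_lines_py (item_lines : List String) (available_space : Int) : List String :=
  pvGoA item_lines 0 available_space

-- ===== PORT B =====
-- itertools.accumulate of the per-line costs
def pvAccum : Int → List Int → List Int
  | _, [] => []
  | acc, c :: cs => (acc + c) :: pvAccum (acc + c) cs

def truncate_item_lines_py_alt (item_lines : List String) (available_space : Int) : List String :=
  let sums := pvAccum 0 (item_lines.map (fun s => PySem.Str.len s + 1))
  let cutoff := PySem.List.bisectRight sums available_space
  if cutoff = item_lines.length then item_lines
  else
    let total := if cutoff = 0 then (0 : Int) else sums.getD (cutoff - 1) 0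
    if available_space - total ≥ 4 then item_lines.take cutoff ++ ["..."]
    else item_lines.take cutoff

-- ===== PRECONDITION & SPEC =====
def Spec_truncate_item_lines_py (item_lines : List String) (available_space : Int) (out : List String) : Prop := out = truncate_item_lines_py_alt item_lines available_space
instance (item_lines : List String) (available_space : Int) (out : List String) : Decidable (Spec_truncate_item_lines_py item_lines available_space out) := by unfold Spec_truncate_item_lines_py; infer_instance

-- ===== CLAIM (what is proved, stated in full; the proofs are below) =====
def Claim_equal_truncate_item_lines_py : Prop := ∀ (item_lines : List String) (available_space : Int), Dom_truncate_item_lines_py item_lines available_space → Spec_truncate_item_lines_py item_lines available_space (truncate_item_lines_py item_lines available_space)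

-- ===== LEMMAS AND PROOFS =====

-- the number of leading costs whose running total (from cur) stays ≤ avail
def pvCnt : Int → Int → List Int → Nat
  | _, _, [] => 0
  | cur, avail, c :: cs => if cur + c ≤ avail then pvCnt (cur + c) avail cs + 1 else 0

theorem pvAccum_ge (cs : List Int) (cur : Int) (h1 : ∀ c ∈ cs, 1 ≤ c) :
    ∀ y ∈ pvAccum cur cs, cur + 1 ≤ y := by
  induction cs generalizing cur with
  | nil => intro y hy; simp [pvAccum] at hy
  | cons c cs ih =>
    intro y hy
    simp only [pvAccum, List.mem_cons] at hy
    rcases hy with rfl | hy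
    · have := h1 c (by simp); omega
    · have := ih (cur + c) (fun d hd => h1 d (by simp [hd])) y hy
      have := h1 c (by simp); omega

theorem pvAccum_sorted (cs : List Int) (cur : Int) (h1 : ∀ c ∈ cs, 1 ≤ c) :
    (pvAccum cur cs).Pairwise (fun a b => a ≤ b) := by
  induction cs generalizing cur with
  | nil => simp [pvAccum]
  | cons c cs ih =>
    simp only [pvAccum, List.pairwise_cons]
    refine ⟨fun y hy => ?_, ih (cur + c) (fun d hd => h1 d (by simp [hd]))⟩
    have := pvAccum_ge cs (cur + c) (fun d hd => h1 d (by simp [hd])) y hy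
    omega

theorem pvAccum_length (cs : List Int) (cur : Int) :
    (pvAccum cur cs).length = cs.length := by
  induction cs generalizing cur with
  | nil => simp [pvAccum]
  | cons c cs ih => simp [pvAccum, ih]

theorem pvCnt_le_length (cs : List Int) (cur avail : Int) :
    pvCnt cur avail cs ≤ cs.length := by
  induction cs generalizing cur with
  | nil => simp [pvCnt]
  | cons c cs ih =>
    simp only [pvCnt]
    split_ifs
    · have := ih (cur + c); simp; omega
    · simp

theorem pvCnt_below (cs : List Int) (cur avail : Int) :
    ∀ (j : Nat) (hj : j < (pvAccum cur cs).length), j < pvCnt cur avail cs →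
      (pvAccum cur cs)[j] ≤ avail := by
  induction cs generalizing cur with
  | nil => intro j hj; simp [pvAccum] at hj
  | cons c cs ih =>
    intro j hj hlt
    simp only [pvCnt] at hlt
    split_ifs at hlt with h
    · match j with
      | 0 => simpa [pvAccum] using h
      | j + 1 =>
        have hj' : j < (pvAccum (cur + c) cs).length := by
          simpa [pvAccum] using hj
        simpa [pvAccum] using ih (cur + c) j hj' (by omega)
    · omega

theorem pvCnt_above (cs : List Int) (cur avail : Int) (h1 : ∀ c ∈ cs, 1 ≤ c) :
    ∀ (j : Nat) (hj : j < (pvAccum cur cs).length), pvCnt cur avail cs ≤ j →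
      avail < (pvAccum cur cs)[j] := by
  induction cs generalizing cur with
  | nil => intro j hj; simp [pvAccum] at hj
  | cons c cs ih =>
    intro j hj hge
    simp only [pvCnt] at hge
    split_ifs at hge with h
    · match j with
      | 0 => omega
      | j + 1 =>
        have hj' : j < (pvAccum (cur + c) cs).length := by
          simpa [pvAccum] using hj
        simpa [pvAccum] using
          ih (cur + c) (fun d hd => h1 d (by simp [hd])) j hj' (by omega)
    · match j with
      | 0 => simp only [pvAccum]; simp; omega
      | j + 1 =>
        have hj' : j < (pvAccum (cur + c) cs).length := by
          simpa [pvAccum] using hj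
        have hmem : (pvAccum (cur + c) cs)[j] ∈ pvAccum (cur + c) cs :=
          List.getElem_mem hj'
        have := pvAccum_ge cs (cur + c) (fun d hd => h1 d (by simp [hd])) _ hmem
        simp only [pvAccum]
        simp
        omega

-- a sorted list admits at most one valid bisect_right answer, so pvCnt IS bisectRight
theorem pvBisect_eq_cnt (cs : List Int) (cur avail : Int) (h1 : ∀ c ∈ cs, 1 ≤ c) :
    PySem.List.bisectRight (pvAccum cur cs) avail = pvCnt cur avail cs := by
  obtain ⟨hb1, hb2, hb3⟩ :=
    PySem.List.bisectRight_spec (pvAccum cur cs) avail (pvAccum_sorted cs cur h1)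
  set b := PySem.List.bisectRight (pvAccum cur cs) avail with hbdef
  have hc1 : pvCnt cur avail cs ≤ (pvAccum cur cs).length := by
    rw [pvAccum_length]; exact pvCnt_le_length cs cur avail
  rcases Nat.lt_trichotomy b (pvCnt cur avail cs) with h | h | h
  · have hj : b < (pvAccum cur cs).length := lt_of_lt_of_le h hc1
    have := pvCnt_below cs cur avail b hj h
    have := hb3 b hj (le_refl b)
    omega
  · exact h
  · have hj : pvCnt cur avail cs < (pvAccum cur cs).length := lt_of_lt_of_le h hb1
    have := pvCnt_above cs cur avail h1 _ hj (le_refl _)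
    have := hb2 _ hj h
    omega

-- the generalized B-side body, with the loop offset cur folded into the table
def pvAltGen (items : List String) (cur avail : Int) : List String :=
  let sums := pvAccum cur (items.map (fun s => PySem.Str.len s + 1))
  let cutoff := pvCnt cur avail (items.map (fun s => PySem.Str.len s + 1))
  if cutoff = items.length then items
  else
    let total := if cutoff = 0 then cur else sums.getD (cutoff - 1) 0
    if avail - total ≥ 4 then items.take cutoff ++ ["..."]
    else items.take cutoff

theorem pvGoA_eq_altGen (items : List String) (cur avail : Int) :
    pvGoA items cur avail = pvAltGen items cur avail := by
  induction items generalizing cur with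
  | nil => simp [pvGoA, pvAltGen, pvCnt]
  | cons item rest ih =>
    simp only [pvGoA, pvAltGen, List.map_cons, pvCnt, pvAccum]
    set c := PySem.Str.len item + 1 with hc
    by_cases h : cur + c ≤ avail
    · simp only [if_pos h]
      rw [ih (cur + c)]
      simp only [pvAltGen]
      set k := pvCnt (cur + c) avail (rest.map (fun s => PySem.Str.len s + 1)) with hk
      by_cases hall : k = rest.length
      · simp [hall]
      · have hne : ¬ (k + 1 = (item :: rest).length) := by simp [List.length_cons]; omega
        simp only [if_neg hall, if_neg hne]
        have htot : (((cur + c) :: pvAccum (cur + c) (rest.map (fun s => PySem.Str.len s + 1))).getD (k + 1 - 1) 0)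
            = (if k = 0 then cur + c
               else (pvAccum (cur + c) (rest.map (fun s => PySem.Str.len s + 1))).getD (k - 1) 0) := by
          match k with
          | 0 => simp
          | k + 1 => simp
        simp only [Nat.succ_ne_zero, if_false, htot]
        split_ifs <;> simp [List.take_succ_cons]
    · simp [h]

theorem pv_costs_ge_one (items : List String) :
    ∀ c ∈ items.map (fun s => PySem.Str.len s + 1), 1 ≤ c := by
  intro c hc
  simp only [List.mem_map] at hc
  obtain ⟨s, _, rfl⟩ := hc
  have : (0:Int) ≤ PySem.Str.len s := by
    rw [PySem.Str.len_eq]; exact_mod_cast Nat.zero_le _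
  omega

theorem pv_alt_eq_altGen (items : List String) (avail : Int) :
    truncate_item_lines_py_alt items avail = pvAltGen items 0 avail := by
  simp only [truncate_item_lines_py_alt, pvAltGen,
    pvBisect_eq_cnt _ 0 avail (pv_costs_ge_one items)]

-- ===== VERDICT (by name: the statement is the Claim_ definition above) =====
theorem truncate_item_lines_py_spec : Claim_equal_truncate_item_lines_py := by
  intro item_lines available_space _
  unfold Spec_truncate_item_lines_py truncate_item_lines_py
  rw [pv_alt_eq_altGen, pvGoA_eq_altGen]
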